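-- pv_equiv track=rewrite | github.com/ericharding/config_gen | script/config_gen.py | get_cpp_type
-- ===== SOURCE A (Python) =====
-- ARRAY_PREFIX = "array["
--
-- MAP_PREFIX = "map["
--
-- def get_cpp_type(xml_type):
--     if xml_type == 'string':
--         return 'std::string'
--     elif xml_type == 'uint':
--         return 'uint32_t'
--     elif xml_type == 'int':
--         return 'int32_t'
--     elif xml_type.startswith(ARRAY_PREFIX):
--         inner_type = xml_type[len(ARRAY_PREFIX):-1]
--         return f'std::vector<{get_cpp_type(inner_type)}>'
--     elif xml_type.startswith(MAP_PREFIX):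
--         inner_type = xml_type[len(MAP_PREFIX):-1]
--         return f'std::map<std::string,{get_cpp_type(inner_type)}>'
--     else:
--         return xml_type
-- ===== SOURCE B (Python) =====
-- ARRAY_PREFIX = "array["
--
-- MAP_PREFIX = "map["
--
-- _BASE = {'string': 'std::string', 'uint': 'uint32_t', 'int': 'int32_t'}
--
-- def get_cpp_type(xml_type):
--     # Iterative decomposition: peel wrapper prefixes into a list, then fold
--     # the recorded templates around the translated base type.
--     wrappers = []
--     s = xml_type
--     while True:
--         if s.startswith(ARRAY_PREFIX):
--             wrappers.append('std::vector<{}>')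
--             s = s[len(ARRAY_PREFIX):-1]
--         elif s.startswith(MAP_PREFIX):
--             wrappers.append('std::map<std::string,{}>')
--             s = s[len(MAP_PREFIX):-1]
--         else:
--             break
--     result = _BASE.get(s, s)
--     for w in reversed(wrappers):
--         result = w.format(result)
--     return result
-- ===== Notes on version B (the rewrite author's own statement) =====
-- stated objective: alternative
-- what changed: Replaced A's recursion with an explicit peeling loop that strips 'array['/'map[' prefixes while recording the wrapper templates, then maps the remaining base type via a dict and folds the recorded templates back around it from the innermost outward.
import Mathlib
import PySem

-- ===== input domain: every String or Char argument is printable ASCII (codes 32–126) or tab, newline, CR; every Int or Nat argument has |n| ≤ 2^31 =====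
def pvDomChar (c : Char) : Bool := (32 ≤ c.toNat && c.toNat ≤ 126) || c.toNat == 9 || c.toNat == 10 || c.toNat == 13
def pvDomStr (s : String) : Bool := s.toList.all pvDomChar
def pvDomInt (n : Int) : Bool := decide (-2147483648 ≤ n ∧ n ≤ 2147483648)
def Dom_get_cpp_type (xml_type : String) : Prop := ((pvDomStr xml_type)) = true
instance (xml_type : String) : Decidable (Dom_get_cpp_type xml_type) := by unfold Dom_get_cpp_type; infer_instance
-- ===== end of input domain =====

-- B replaces A's recursion by an explicit peeling loop (wrapper list + fold); alternative decomposition, same cost.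


-- B peels one trailing char together with a 6-char (resp. 4-char) prefix, so the string shrinks
theorem pvSliceLen_lt (cs : List Char) (a : Int) (ha : 0 < a) (h : a.toNat ≤ cs.length) :
    (PySem.List.slice cs (some a) (some (-1))).length < cs.length := by
  rw [PySem.List.length_slice]
  simp only [PySem.List.clampIdx]
  split_ifs <;> omega

-- ===== PORT A =====
-- literal transliteration of A's recursion, on List Char
def get_cpp_type_core (cs : List Char) : List Char :=
  if cs = "string".toList then "std::string".toList
  else if cs = "uint".toList then "uint32_t".toList
  else if cs = "int".toList then "int32_t".toList
  else if PySem.Chars.startswith cs "array[".toList = true then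
    "std::vector<".toList ++ get_cpp_type_core (PySem.List.slice cs (some 6) (some (-1))) ++ ">".toList
  else if PySem.Chars.startswith cs "map[".toList = true then
    "std::map<std::string,".toList ++ get_cpp_type_core (PySem.List.slice cs (some 4) (some (-1))) ++ ">".toList
  else cs
termination_by cs.length
decreasing_by
  · have := (PySem.Chars.startswith_iff cs "array[".toList).mp (by assumption)
    exact pvSliceLen_lt cs 6 (by omega) (by have := this.length_le; simpa using this)
  · have := (PySem.Chars.startswith_iff cs "map[".toList).mp (by assumption)
    exact pvSliceLen_lt cs 4 (by omega) (by have := this.length_le; simpa using this)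

def get_cpp_type (xml_type : String) : String :=
  String.ofList (get_cpp_type_core xml_type.toList)

-- ===== PORT B =====
-- peel the wrapper prefixes, recording each wrapper (true = vector, false = map)
def pvPeel (cs : List Char) (acc : List Bool) : List Char × List Bool :=
  if PySem.Chars.startswith cs "array[".toList = true then
    pvPeel (PySem.List.slice cs (some 6) (some (-1))) (acc ++ [true])
  else if PySem.Chars.startswith cs "map[".toList = true then
    pvPeel (PySem.List.slice cs (some 4) (some (-1))) (acc ++ [false])
  else (cs, acc)
termination_by cs.length
decreasing_by
  · have := (PySem.Chars.startswith_iff cs "array[".toList).mp (by assumption)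
    exact pvSliceLen_lt cs 6 (by omega) (by have := this.length_le; simpa using this)
  · have := (PySem.Chars.startswith_iff cs "map[".toList).mp (by assumption)
    exact pvSliceLen_lt cs 4 (by omega) (by have := this.length_le; simpa using this)

-- the base-type dictionary lookup with the string itself as default
def pvBase (cs : List Char) : List Char :=
  if cs = "string".toList then "std::string".toList
  else if cs = "uint".toList then "uint32_t".toList
  else if cs = "int".toList then "int32_t".toList
  else cs

-- w.format(result) for the two recorded templates
def pvWrap (b : List Char) (w : Bool) : List Char :=
  if w then "std::vector<".toList ++ b ++ ">".toList
  else "std::map<std::string,".toList ++ b ++ ">".toList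

def get_cpp_type_alt (xml_type : String) : String :=
  String.ofList ((pvPeel xml_type.toList []).2.reverse.foldl pvWrap (pvBase (pvPeel xml_type.toList []).1))

-- ===== PRECONDITION & SPEC =====
def Spec_get_cpp_type (xml_type : String) (out : String) : Prop := out = get_cpp_type_alt xml_type
instance (xml_type : String) (out : String) : Decidable (Spec_get_cpp_type xml_type out) := by unfold Spec_get_cpp_type; infer_instance

-- ===== CLAIM (what is proved, stated in full; the proofs are below) =====
def Claim_equal_get_cpp_type : Prop := ∀ (xml_type : String), Dom_get_cpp_type xml_type → Spec_get_cpp_type xml_type (get_cpp_type xml_type)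

-- ===== LEMMAS AND PROOFS =====

-- a string starting with "array[" is none of the three base literals, so A takes the vector branch
theorem core_array (cs : List Char) (h : PySem.Chars.startswith cs "array[".toList = true) :
    get_cpp_type_core cs =
      "std::vector<".toList ++ get_cpp_type_core (PySem.List.slice cs (some 6) (some (-1))) ++ ">".toList := by
  obtain ⟨t, ht⟩ := (PySem.Chars.startswith_iff cs "array[".toList).mp h
  subst ht
  simp at h
  rw [get_cpp_type_core]
  simp [h]

theorem core_map (cs : List Char) (h1 : PySem.Chars.startswith cs "array[".toList = false)
    (h : PySem.Chars.startswith cs "map[".toList = true) :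
    get_cpp_type_core cs =
      "std::map<std::string,".toList ++ get_cpp_type_core (PySem.List.slice cs (some 4) (some (-1))) ++ ">".toList := by
  obtain ⟨t, ht⟩ := (PySem.Chars.startswith_iff cs "map[".toList).mp h
  subst ht
  simp at h h1
  rw [get_cpp_type_core]
  simp [h, h1]

theorem core_base (cs : List Char) (h1 : PySem.Chars.startswith cs "array[".toList = false)
    (h2 : PySem.Chars.startswith cs "map[".toList = false) :
    get_cpp_type_core cs = pvBase cs := by
  simp at h1 h2
  rw [get_cpp_type_core, pvBase]
  simp [h1, h2]

-- loop invariant: finishing the peel from (cs, acc) equals wrapping A's answer for cs in acc's wrappers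
theorem pvPeel_key (cs : List Char) (acc : List Bool) :
    ((pvPeel cs acc).2.reverse.foldl pvWrap (pvBase (pvPeel cs acc).1))
      = acc.reverse.foldl pvWrap (get_cpp_type_core cs) := by
  induction cs, acc using pvPeel.induct with
  | case1 cs acc h ih =>
    rw [pvPeel, if_pos h, ih, core_array cs h]
    simp [pvWrap]
  | case2 cs acc h1 h ih =>
    rw [pvPeel, if_neg (by simpa using h1), if_pos h, ih,
      core_map cs (by simpa using h1) h]
    simp [pvWrap]
  | case3 cs acc h1 h2 =>
    rw [pvPeel, if_neg (by simpa using h1), if_neg (by simpa using h2),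
      core_base cs (by simpa using h1) (by simpa using h2)]

-- ===== VERDICT (by name: the statement is the Claim_ definition above) =====
theorem get_cpp_type_spec : Claim_equal_get_cpp_type := by
  intro xml_type _
  unfold Spec_get_cpp_type get_cpp_type get_cpp_type_alt
  rw [pvPeel_key]
  simp
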